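-- pv_equiv track=rewrite | github.com/guybarnahum/video-analyzer | video-analyzer-ui/video_analyzer_ui/server.py | sanitize_cmd_list
-- ===== SOURCE A (Python) =====
-- def sanitize_cmd_list(args):
--     sanitized_args = []
--
--     i = 0
--     while i < len(args):
--         sanitized_args.append(args[i])
--         arg_match = args[i].lower().replace('-','_')
--         if 'api_key' in arg_match and i + 1 < len(args):
--             value = args[i+1][:6] + '****...'
--             sanitized_args.append(value)  # Replace API key value
--             i += 1  # Skip the next argument (the sensitive value)
--         i += 1
--
--     return sanitized_args
-- ===== SOURCE B (Python) =====
-- def sanitize_cmd_list(args):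
--     sanitized_args = []
--     mask_next = False
--     for arg in args:
--         if mask_next:
--             sanitized_args.append(arg[:6] + '****...')
--             mask_next = False
--         else:
--             sanitized_args.append(arg)
--             mask_next = 'api_key' in arg.lower().replace('-', '_')
--     return sanitized_args
-- ===== Notes on version B (the rewrite author's own statement) =====
-- stated objective: idiomatic
-- what changed: Replaces the manual while-loop with index arithmetic, lookahead args[i+1] and double increment to skip the sensitive value by a plain for-loop over the elements carrying a one-bit mask_next state saying whether the current element is a value to mask.
import Mathlib
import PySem

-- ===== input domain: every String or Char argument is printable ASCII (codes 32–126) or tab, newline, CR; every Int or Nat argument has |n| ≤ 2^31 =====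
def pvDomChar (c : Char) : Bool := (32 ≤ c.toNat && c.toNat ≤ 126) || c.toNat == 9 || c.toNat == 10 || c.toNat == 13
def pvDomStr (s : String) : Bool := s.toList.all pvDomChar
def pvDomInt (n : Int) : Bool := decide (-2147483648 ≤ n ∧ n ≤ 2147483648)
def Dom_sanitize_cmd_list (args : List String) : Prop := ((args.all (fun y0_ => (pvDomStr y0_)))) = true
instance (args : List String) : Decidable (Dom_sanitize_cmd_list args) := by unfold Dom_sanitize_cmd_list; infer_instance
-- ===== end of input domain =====

-- B replaces A's index-based while loop with lookahead-and-skip by a single fold carrying a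
-- one-bit "mask the next element" state (idiomatic; same O(n) cost).


-- ===== PORT A =====
-- shared expression helpers (both Pythons contain these identical expressions):
-- 'api_key' in arg.lower().replace('-','_')
def pvIsKey (s : String) : Bool :=
  PySem.Str.isIn "api_key" (PySem.Str.replace (PySem.Str.lower s) "-" "_")
-- v[:6] + '****...'
def pvMaskVal (v : String) : String :=
  String.ofList (PySem.Chars.slice v.toList none (some 6) ++ "****...".toList)

-- A's while loop: index i, accumulator sanitized_args; on an api_key flag it appends the
-- masked lookahead args[i+1] and skips it (i += 2)
def sanitizeAuxA (args : List String) (i : Nat) (acc : List String) : List String :=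
  if h : i < args.length then
    let acc' := acc ++ [args[i]]
    if h2 : pvIsKey args[i] = true ∧ i + 1 < args.length then
      sanitizeAuxA args (i + 2) (acc' ++ [pvMaskVal (args[i+1]'h2.2)])
    else
      sanitizeAuxA args (i + 1) acc'
  else acc
termination_by args.length - i

def sanitize_cmd_list (args : List String) : List String :=
  sanitizeAuxA args 0 []

-- ===== PORT B =====
def sanitize_cmd_list_alt (args : List String) : List String :=
  (args.foldl
    (fun (st : List String × Bool) arg =>
      if st.2 then (st.1 ++ [pvMaskVal arg], false)
      else (st.1 ++ [arg], pvIsKey arg))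
    (([] : List String), false)).1

-- ===== PRECONDITION & SPEC =====
def Spec_sanitize_cmd_list (args : List String) (out : List String) : Prop := out = sanitize_cmd_list_alt args
instance (args : List String) (out : List String) : Decidable (Spec_sanitize_cmd_list args out) := by unfold Spec_sanitize_cmd_list; infer_instance

-- ===== CLAIM (what is proved, stated in full; the proofs are below) =====
def Claim_equal_sanitize_cmd_list : Prop := ∀ (args : List String), Dom_sanitize_cmd_list args → Spec_sanitize_cmd_list args (sanitize_cmd_list args)

-- ===== LEMMAS AND PROOFS =====

-- canonical form of both computations: the remaining input plus the one-bit state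
def pvG : Bool → List String → List String
  | _, [] => []
  | true, v :: rs => pvMaskVal v :: pvG false rs
  | false, a :: rs => a :: pvG (pvIsKey a) rs

theorem foldB_eq (l : List String) (acc : List String) (b : Bool) :
    (l.foldl
      (fun (st : List String × Bool) arg =>
        if st.2 then (st.1 ++ [pvMaskVal arg], false)
        else (st.1 ++ [arg], pvIsKey arg))
      (acc, b)).1 = acc ++ pvG b l := by
  induction l generalizing acc b with
  | nil => simp [pvG]
  | cons a rest ih =>
      cases b <;> simp [List.foldl, pvG, ih, List.append_assoc]

theorem auxA_eq (n : Nat) : ∀ (args : List String) (i : Nat) (acc : List String),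
    args.length - i ≤ n → sanitizeAuxA args i acc = acc ++ pvG false (args.drop i) := by
  induction n with
  | zero =>
      intro args i acc hle
      rw [sanitizeAuxA, dif_neg (by omega : ¬ i < args.length),
        List.drop_eq_nil_of_le (by omega : args.length ≤ i)]
      simp [pvG]
  | succ n ihn =>
      intro args i acc hle
      rw [sanitizeAuxA]
      by_cases h : i < args.length
      · rw [dif_pos h]
        by_cases h2 : pvIsKey args[i] = true ∧ i + 1 < args.length
        · rw [dif_pos h2, ihn args (i+2) _ (by omega),
            List.drop_eq_getElem_cons h]
          rw [List.drop_eq_getElem_cons h2.2]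
          simp only [pvG, h2.1, List.append_assoc, List.cons_append, List.nil_append]
        · rw [dif_neg h2, ihn args (i+1) _ (by omega), List.drop_eq_getElem_cons h]
          by_cases hk : pvIsKey args[i] = true
          · have hnil : args.drop (i+1) = [] := by
              refine List.drop_eq_nil_of_le ?_
              by_contra hc
              exact h2 ⟨hk, by omega⟩
            rw [hnil]
            simp [pvG]
          · simp only [Bool.not_eq_true] at hk
            simp [pvG, hk, List.append_assoc]
      · rw [dif_neg h, List.drop_eq_nil_of_le (by omega : args.length ≤ i)]
        simp [pvG]

-- ===== VERDICT (by name: the statement is the Claim_ definition above) =====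
theorem sanitize_cmd_list_spec : Claim_equal_sanitize_cmd_list := by
  intro args _
  unfold Spec_sanitize_cmd_list sanitize_cmd_list sanitize_cmd_list_alt
  rw [auxA_eq args.length args 0 [] (by omega), foldB_eq]
  simp
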